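-- pv_equiv track=rewrite | github.com/valetedd/code_iguess | ctp/lab.py | max_lessons_hours
-- ===== SOURCE A (Python) =====
-- ctp_lessons_extended = [(2,"12/10/22","09:30-11:30","Introduction to the course"),(2,"14/10/22","12:30-14:30 ","Introduction to Computational Thinking"),(2,"17/10/22","09:30-11:30","Algorithms"),(2,"19/10/22","09:30-11:30","Laboratory"),(2,"21/10/22","12:30-14:30","Computability"),(2,"24/10/22","09:30-11:30","Programming languages"),(2,"26/10/22","09:30-11:30","Laboratory"),(2,"28/10/22","12:30-14:30","Organising information: ordered structures"),(2,"09/11/22","09:30-11:30","Brute-force algorithms"),(2,"11/11/22","12:30-14:30","Laboratory"),(2,"14/11/22","09:30-11:30","Organising information: unordered structures"),(2,"16/11/22","09:30-11:30","Laboratory"),(2,"21/11/22","09:30-11:30","Recursion"),(2,"23/11/22","09:30-11:30","Divide and conquer algorithms"),(2,"28/11/22","09:30-11:30","Laboratory"),(2,"30/11/22","09:30-11:30","Dynamic programming algorithms"),(2,"05/12/22","09:30-11:30","Laboratory"),(2,"12/12/22","09:30-11:30","Organising information: trees"),(2,"14/12/22","09:30-11:30","Backtracking algorithms"),(2,"19/12/22","09:30-11:30","Organising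 information: graphs"),(2,"21/12/22","09:30-11:30","Greedy algorithms")]
--
-- def max_lessons_hours(list_tuple_lessons, max_hours):
--     result = list()
--     sum_of_hours = 0
--     while sum_of_hours <= max_hours:
--         for tuple in ctp_lessons_extended:
--             result.append(tuple[3])
--             sum_of_hours += tuple[0]
--     return result
-- ===== SOURCE B (Python) =====
-- # titles of ctp_lessons_extended in order (the source list is a module constant,
-- # so its title projection is a constant too), and the hours added by one full pass
-- CTP_TITLES = ["Introduction to the course", "Introduction to Computational Thinking",
--     "Algorithms", "Laboratory", "Computability", "Programming languages", "Laboratory",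
--     "Organising information: ordered structures", "Brute-force algorithms", "Laboratory",
--     "Organising information: unordered structures", "Laboratory", "Recursion",
--     "Divide and conquer algorithms", "Laboratory", "Dynamic programming algorithms",
--     "Laboratory", "Organising information: trees", "Backtracking algorithms",
--     "Organising information: graphs", "Greedy algorithms"]
-- HOURS_PER_PASS = 42  # sum of the hour fields of ctp_lessons_extended
--
-- def max_lessons_hours(list_tuple_lessons, max_hours):
--     # closed form: the while loop runs max_hours // 42 + 1 full passes
--     if 0 > max_hours:
--         return []
--     passes = max_hours // HOURS_PER_PASS + 1
--     return CTP_TITLES * passes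
-- ===== Notes on version B (the rewrite author's own statement) =====
-- stated objective: simpler
-- what changed: Replaces A's nested while/for hour-accumulation loops with a precomputed title-list constant and a closed-form pass count (max_hours // 42 + 1, since each pass over the 21 fixed lessons adds 42 hours) repeated by list multiplication.
import Mathlib
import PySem

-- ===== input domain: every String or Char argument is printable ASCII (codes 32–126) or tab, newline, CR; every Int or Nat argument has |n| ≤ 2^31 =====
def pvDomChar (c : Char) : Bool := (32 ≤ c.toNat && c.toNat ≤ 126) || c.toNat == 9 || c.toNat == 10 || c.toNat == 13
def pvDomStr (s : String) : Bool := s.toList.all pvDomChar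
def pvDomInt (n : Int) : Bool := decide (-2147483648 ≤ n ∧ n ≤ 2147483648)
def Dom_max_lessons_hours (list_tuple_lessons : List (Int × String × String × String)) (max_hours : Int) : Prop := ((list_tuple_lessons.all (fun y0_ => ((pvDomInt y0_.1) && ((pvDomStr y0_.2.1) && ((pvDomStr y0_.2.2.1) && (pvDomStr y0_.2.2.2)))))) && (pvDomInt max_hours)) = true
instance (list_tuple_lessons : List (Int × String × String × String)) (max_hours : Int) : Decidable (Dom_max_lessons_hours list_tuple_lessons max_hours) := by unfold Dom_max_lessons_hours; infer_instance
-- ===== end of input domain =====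

-- B replaces A's hour-accumulating while/for loops by a precomputed constant list of
-- titles repeated a closed-form number of times (max_hours // 42 + 1); objective: simpler.
-- NOTE: A ignores its list_tuple_lessons parameter and reads the module constant.

-- ===== PORT A =====
def ctpLessonsExtended : List (Int × String × String × String) := [(2,"12/10/22","09:30-11:30","Introduction to the course"),(2,"14/10/22","12:30-14:30 ","Introduction to Computational Thinking"),(2,"17/10/22","09:30-11:30","Algorithms"),(2,"19/10/22","09:30-11:30","Laboratory"),(2,"21/10/22","12:30-14:30","Computability"),(2,"24/10/22","09:30-11:30","Programming languages"),(2,"26/10/22","09:30-11:30","Laboratory"),(2,"28/10/22","12:30-14:30","Organising information: ordered structures"),(2,"09/11/22","09:30-11:30","Brute-force algorithms"),(2,"11/11/22","12:30-14:30","Laboratory"),(2,"14/11/22","09:30-11:30","Organising information: unordered structures"),(2,"16/11/22","09:30-11:30","Laboratory"),(2,"21/11/22","09:30-11:30","Recursion"),(2,"23/11/22","09:30-11:30","Divide and conquer algorithms"),(2,"28/11/22","09:30-11:30","Laboratory"),(2,"30/11/22","09:30-11:30","Dynamic programming algorithms"),(2,"05/12/22","09:30-11:30","Laboratory"),(2,"12/12/22","09:30-11:30","Organising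 information: trees"),(2,"14/12/22","09:30-11:30","Backtracking algorithms"),(2,"19/12/22","09:30-11:30","Organising information: graphs"),(2,"21/12/22","09:30-11:30","Greedy algorithms")]

-- one iteration of A's inner 'for tuple in ctp_lessons_extended' loop body, folded over the list
def pvPassA (st : List String × Int) : List String × Int :=
  ctpLessonsExtended.foldl (fun acc t => (acc.1 ++ [t.2.2.2], acc.2 + t.1)) st

-- fixed effect of one pass: 21 titles appended, 42 hours added (used for termination)
theorem pvPassA_eq (r : List String) (s : Int) :
    pvPassA (r, s) = (r ++ (ctpLessonsExtended.map (fun t => t.2.2.2)), s + 42) := by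
  simp [pvPassA, ctpLessonsExtended, List.foldl]; omega

-- A's 'while sum_of_hours <= max_hours' loop
def pvLoopA (max_hours : Int) (st : List String × Int) : List String :=
  if st.2 ≤ max_hours then pvLoopA max_hours (pvPassA st) else st.1
termination_by (max_hours + 1 - st.2).toNat
decreasing_by
  rcases st with ⟨r, s⟩
  rw [pvPassA_eq]
  simp only [] at *
  omega

def max_lessons_hours (list_tuple_lessons : List (Int × String × String × String)) (max_hours : Int) : List String :=
  pvLoopA max_hours ([], 0)

-- ===== PORT B =====
-- CTP_TITLES: module-level constant of Source B
def ctpTitlesB : List String := ["Introduction to the course", "Introduction to Computational Thinking",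
    "Algorithms", "Laboratory", "Computability", "Programming languages", "Laboratory",
    "Organising information: ordered structures", "Brute-force algorithms", "Laboratory",
    "Organising information: unordered structures", "Laboratory", "Recursion",
    "Divide and conquer algorithms", "Laboratory", "Dynamic programming algorithms",
    "Laboratory", "Organising information: trees", "Backtracking algorithms",
    "Organising information: graphs", "Greedy algorithms"]

-- HOURS_PER_PASS
def hoursPerPassB : Int := 42

-- Python list multiplication 'xs * n' (n copies of xs concatenated)
def pvListMulB (xs : List String) : Nat → List String
  | 0 => []
  | n + 1 => xs ++ pvListMulB xs n

def max_lessons_hours_alt (list_tuple_lessons : List (Int × String × String × String)) (max_hours : Int) : List String :=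
  if 0 > max_hours then []
  else
    pvListMulB ctpTitlesB (PySem.Int.floordiv max_hours hoursPerPassB + 1).toNat

-- ===== PRECONDITION & SPEC =====
def Spec_max_lessons_hours (list_tuple_lessons : List (Int × String × String × String)) (max_hours : Int) (out : List String) : Prop := out = max_lessons_hours_alt list_tuple_lessons max_hours
instance (list_tuple_lessons : List (Int × String × String × String)) (max_hours : Int) (out : List String) : Decidable (Spec_max_lessons_hours list_tuple_lessons max_hours out) := by unfold Spec_max_lessons_hours; infer_instance

-- ===== CLAIM (what is proved, stated in full; the proofs are below) =====
def Claim_equal_max_lessons_hours : Prop := ∀ (list_tuple_lessons : List (Int × String × String × String)) (max_hours : Int), Dom_max_lessons_hours list_tuple_lessons max_hours → Spec_max_lessons_hours list_tuple_lessons max_hours (max_lessons_hours list_tuple_lessons max_hours)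

-- ===== LEMMAS AND PROOFS =====

-- B's constant title list is exactly the projection of the lesson list A iterates over
theorem ctpTitlesB_eq : ctpTitlesB = ctpLessonsExtended.map (fun t => t.2.2.2) := by
  rfl

-- characterisation of A's loop: from hour count s it appends the title block
-- of B's list-multiplication, (max_hours - s) // 42 + 1 times (once per pass)
theorem pvLoopA_eq (max_hours : Int) (r : List String) (s : Int) :
    pvLoopA max_hours (r, s) =
      if s ≤ max_hours then
        r ++ pvListMulB (ctpLessonsExtended.map (fun t => t.2.2.2))
          ((PySem.Int.floordiv (max_hours - s) 42 + 1).toNat)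
      else r := by
  rw [pvLoopA]
  by_cases h : s ≤ max_hours
  · rw [if_pos h, if_pos h, pvPassA_eq, pvLoopA_eq]
    by_cases h2 : s + 42 ≤ max_hours
    · rw [if_pos h2]
      have hk : PySem.Int.floordiv (max_hours - s) 42 = PySem.Int.floordiv (max_hours - (s + 42)) 42 + 1 := by
        rw [PySem.Int.floordiv_eq_ediv_of_pos (by omega), PySem.Int.floordiv_eq_ediv_of_pos (by omega)]
        omega
      have hk2 : 0 ≤ PySem.Int.floordiv (max_hours - (s + 42)) 42 := by
        rw [PySem.Int.floordiv_eq_ediv_of_pos (by omega)]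
        exact Int.ediv_nonneg (by omega) (by omega)
      rw [hk]
      have : (PySem.Int.floordiv (max_hours - (s + 42)) 42 + 1 + 1).toNat
           = ((PySem.Int.floordiv (max_hours - (s + 42)) 42 + 1).toNat) + 1 := by omega
      rw [this]
      simp [pvListMulB]
    · rw [if_neg h2]
      have hk : PySem.Int.floordiv (max_hours - s) 42 = 0 := by
        rw [PySem.Int.floordiv_eq_ediv_of_pos (by omega)]
        omega
      rw [hk]
      simp [pvListMulB]
  · rw [if_neg h]
    exact (if_neg h).symm
termination_by (max_hours + 1 - s).toNat
decreasing_by omega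

-- ===== VERDICT (by name: the statement is the Claim_ definition above) =====
theorem max_lessons_hours_spec : Claim_equal_max_lessons_hours := by
  intro l mh _hd
  unfold Spec_max_lessons_hours max_lessons_hours max_lessons_hours_alt
  rw [pvLoopA_eq, ← ctpTitlesB_eq]
  by_cases h : (0:Int) ≤ mh
  · rw [if_pos h, if_neg (by omega)]
    simp [hoursPerPassB]
  · rw [if_neg h, if_pos (by omega)]
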